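-- pv_equiv track=rewrite | github.com/squall321/KooSurfaceEvolver | kse/mesh/volume_mesher.py | _cap_is_manifold
-- ===== SOURCE A (Python) =====
-- def _cap_is_manifold(
--     cap_tris: list[list[int]],
--     surface_edge_count: dict[tuple[int, int], int],
-- ) -> bool:
--     """Return True if the cap triangles don't create non-manifold edges.
--
--     A cap triangle is non-manifold if it adds an edge that would result in
--     count > 2 in the combined surface+cap mesh.  This happens when two
--     non-adjacent boundary loop vertices are connected by both a surface interior
--     edge (count=2 in surface) AND an interior cap edge (count=2 in cap) →
--     total count=4, causing TetGen to report self-intersections.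
--     """
--     cap_edge_count: dict[tuple[int, int], int] = {}
--     for tri in cap_tris:
--         for k in range(3):
--             key = (min(int(tri[k]), int(tri[(k + 1) % 3])),
--                    max(int(tri[k]), int(tri[(k + 1) % 3])))
--             cap_edge_count[key] = cap_edge_count.get(key, 0) + 1
--
--     for key, cap_cnt in cap_edge_count.items():
--         surf_cnt = surface_edge_count.get(key, 0)
--         if surf_cnt + cap_cnt > 2:
--             return False
--     return True
-- ===== SOURCE B (Python) =====
-- def _cap_is_manifold(
--     cap_tris: list[list[int]],
--     surface_edge_count: dict[tuple[int, int], int],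
-- ) -> bool:
--     """Repeated-partition loop, no counter dict: take the first remaining
--     normalized edge, filter out all its copies in one pass, read its
--     multiplicity off the length drop, check it with early exit, repeat."""
--     edges = [
--         (min(a, b), max(a, b))
--         for t in cap_tris
--         for a, b in ((t[0], t[1]), (t[1], t[2]), (t[2], t[0]))
--     ]
--     while edges:
--         e = edges[0]
--         rest = [x for x in edges if x != e]
--         if surface_edge_count.get(e, 0) + len(edges) - len(rest) > 2:
--             return False
--         edges = rest
--     return True
-- ===== Notes on version B (the rewrite author's own statement) =====
-- stated objective: alternative
-- what changed: B drops the counter dict and the items() pass: a repeated-partition while-loop takes the first remaining normalized edge, filters out all its copies in one pass, reads the multiplicity off the length drop, checks it against the surface count with early exit, and continues on the remainder.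
import Mathlib
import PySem

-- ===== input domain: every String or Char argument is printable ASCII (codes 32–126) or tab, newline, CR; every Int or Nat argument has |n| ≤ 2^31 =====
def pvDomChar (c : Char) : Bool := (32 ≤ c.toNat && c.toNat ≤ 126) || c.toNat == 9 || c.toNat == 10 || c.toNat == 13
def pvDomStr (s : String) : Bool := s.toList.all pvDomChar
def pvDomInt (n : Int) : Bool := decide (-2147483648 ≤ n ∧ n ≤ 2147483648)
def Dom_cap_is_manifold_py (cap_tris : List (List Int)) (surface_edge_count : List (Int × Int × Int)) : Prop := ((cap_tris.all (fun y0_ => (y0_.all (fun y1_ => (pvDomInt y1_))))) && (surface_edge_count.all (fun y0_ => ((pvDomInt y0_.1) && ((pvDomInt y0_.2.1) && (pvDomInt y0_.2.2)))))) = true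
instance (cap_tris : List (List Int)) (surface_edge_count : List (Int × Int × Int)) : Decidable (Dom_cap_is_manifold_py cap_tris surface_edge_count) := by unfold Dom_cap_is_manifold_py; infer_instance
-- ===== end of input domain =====

-- B replaces A's counter dict + items() scan with a repeated-partition loop over the
-- flattened edge list: multiplicity is read off the length drop of a filter, with
-- early exit per distinct edge (objective: alternative).

-- ===== PORT A =====
-- shared argument decoding: surface_edge_count.get(key, 0) on the association list (first match)
def pvSurfGetD (surf : List (Int × Int × Int)) (key : Int × Int) : Int :=
  match surf.find? (fun p => p.1 == key.1 && p.2.1 == key.2) with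
  | some p => p.2.2
  | none => 0

-- the 'for key, cap_cnt in cap_edge_count.items(): … return False' loop
def pvItemsLoopA (surf : List (Int × Int × Int)) : List ((Int × Int) × Int) → Bool
  | [] => true
  | (key, capCnt) :: rest =>
      if pvSurfGetD surf key + capCnt > 2 then false else pvItemsLoopA surf rest

-- tri[k] is ported as pyGetD tri k 0: under Pre_ every index used (0,1,2) is in range,
-- so the default is never taken (Python raises outside Pre_).
def cap_is_manifold_py (cap_tris : List (List Int)) (surface_edge_count : List (Int × Int × Int)) : Bool :=
  let cap_edge_count : PySem.Dict (Int × Int) Int :=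
    cap_tris.foldl (fun d tri =>
      (PySem.List.pyRange 0 3 1).foldl (fun d k =>
        let a := PySem.List.pyGetD tri k 0
        let b := PySem.List.pyGetD tri (PySem.Int.mod (k + 1) 3) 0
        let key := (min a b, max a b)
        d.insert key (d.getD key 0 + 1)) d) PySem.Dict.empty
  pvItemsLoopA surface_edge_count cap_edge_count.items

-- ===== PORT B =====
-- the 'while edges: e = edges[0]; rest = [x for x in edges if x != e]; …' loop
def pvPartLoop (surf : List (Int × Int × Int)) : List (Int × Int) → Bool
  | [] => true
  | e :: es =>
      let rest := (e :: es).filter (fun x => x != e)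
      if pvSurfGetD surf e + ((e :: es).length : Int) - (rest.length : Int) > 2 then false
      else pvPartLoop surf rest
  termination_by l => l.length
  decreasing_by
    simp only [List.filter]
    simp only [bne_self_eq_false]
    exact Nat.lt_succ_of_le (List.length_filter_le _ _)

def cap_is_manifold_py_alt (cap_tris : List (List Int)) (surface_edge_count : List (Int × Int × Int)) : Bool :=
  let edges : List (Int × Int) :=
    cap_tris.flatMap (fun t =>
      [(PySem.List.pyGetD t 0 0, PySem.List.pyGetD t 1 0),
       (PySem.List.pyGetD t 1 0, PySem.List.pyGetD t 2 0),
       (PySem.List.pyGetD t 2 0, PySem.List.pyGetD t 0 0)].map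
        (fun ab => (min ab.1 ab.2, max ab.1 ab.2)))
  pvPartLoop surface_edge_count edges

-- ===== PRECONDITION & SPEC =====
-- Pre_ excludes exactly the inputs where Python A raises IndexError: a triangle with fewer than 3 vertices.
def Pre_cap_is_manifold_py (cap_tris : List (List Int)) (surface_edge_count : List (Int × Int × Int)) : Prop :=
  ∀ tri ∈ cap_tris, 3 ≤ tri.length
instance (cap_tris : List (List Int)) (surface_edge_count : List (Int × Int × Int)) : Decidable (Pre_cap_is_manifold_py cap_tris surface_edge_count) := by unfold Pre_cap_is_manifold_py; infer_instance

def pvWitness_cap_is_manifold_py : List (List Int) × (List (Int × Int × Int)) := ([[0, 1, 2]], [(0, 1, 2)])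

def Spec_cap_is_manifold_py (cap_tris : List (List Int)) (surface_edge_count : List (Int × Int × Int)) (out : Bool) : Prop := out = cap_is_manifold_py_alt cap_tris surface_edge_count
instance (cap_tris : List (List Int)) (surface_edge_count : List (Int × Int × Int)) (out : Bool) : Decidable (Spec_cap_is_manifold_py cap_tris surface_edge_count out) := by unfold Spec_cap_is_manifold_py; infer_instance

-- ===== CLAIM (what is proved, stated in full; the proofs are below) =====
def Claim_equal_cap_is_manifold_py : Prop := ∀ (cap_tris : List (List Int)) (surface_edge_count : List (Int × Int × Int)), Dom_cap_is_manifold_py cap_tris surface_edge_count → Pre_cap_is_manifold_py cap_tris surface_edge_count → Spec_cap_is_manifold_py cap_tris surface_edge_count (cap_is_manifold_py cap_tris surface_edge_count)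

-- ===== LEMMAS AND PROOFS =====

-- the three normalized edge keys of one triangle (the common value both ports produce per tri)
def pvEdgeKeys (t : List Int) : List (Int × Int) :=
  [(min (PySem.List.pyGetD t 0 0) (PySem.List.pyGetD t 1 0), max (PySem.List.pyGetD t 0 0) (PySem.List.pyGetD t 1 0)),
   (min (PySem.List.pyGetD t 1 0) (PySem.List.pyGetD t 2 0), max (PySem.List.pyGetD t 1 0) (PySem.List.pyGetD t 2 0)),
   (min (PySem.List.pyGetD t 2 0) (PySem.List.pyGetD t 0 0), max (PySem.List.pyGetD t 2 0) (PySem.List.pyGetD t 0 0))]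

lemma pv_innerA (d : PySem.Dict (Int × Int) Int) (t : List Int) :
    (PySem.List.pyRange 0 3 1).foldl (fun d k =>
        let a := PySem.List.pyGetD t k 0
        let b := PySem.List.pyGetD t (PySem.Int.mod (k + 1) 3) 0
        let key := (min a b, max a b)
        d.insert key (d.getD key 0 + 1)) d
    = (pvEdgeKeys t).foldl (fun d key => d.insert key (d.getD key 0 + 1)) d := rfl

lemma pv_loopA_eq_all (surf : List (Int × Int × Int)) (items : List ((Int × Int) × Int)) :
    pvItemsLoopA surf items = items.all (fun kc => pvSurfGetD surf kc.1 + kc.2 ≤ 2) := by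
  induction items with
  | nil => rfl
  | cons kc rest ih =>
    obtain ⟨k, c⟩ := kc
    simp only [pvItemsLoopA, List.all_cons, ih]
    split_ifs with h <;> simp <;> omega

lemma pv_all_ext {α : Type} (l₁ l₂ : List α) (q : α → Bool) (h : ∀ x, x ∈ l₁ ↔ x ∈ l₂) :
    l₁.all q = l₂.all q := by
  rw [Bool.eq_iff_iff, List.all_eq_true, List.all_eq_true]
  exact ⟨fun hh x hx => hh x ((h x).mpr hx), fun hh x hx => hh x ((h x).mp hx)⟩

-- the partition loop decides 'every edge occurrence respects the count bound'
lemma pv_len_filter_count (e : Int × Int) (l : List (Int × Int)) :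
    (l.filter (fun x => x != e)).length + l.count e = l.length := by
  induction l with
  | nil => simp
  | cons a t ih =>
    by_cases h : a = e <;> simp [h, ← ih] <;> omega

lemma pv_partLoop_eq_all (surf : List (Int × Int × Int)) :
    ∀ (n : ℕ) (l : List (Int × Int)), l.length = n →
      pvPartLoop surf l = l.all (fun e => pvSurfGetD surf e + (l.count e : Int) ≤ 2) := by
  intro n
  induction n using Nat.strong_induction_on with
  | _ n ih =>
    intro l hl
    match l with
    | [] => simp [pvPartLoop]
    | e :: es =>
      rw [pvPartLoop]
      have hfil : (e :: es).filter (fun x => x != e) = es.filter (fun x => x != e) := by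
        simp [List.filter]
      have hc := pv_len_filter_count e (e :: es)
      by_cases hbig : pvSurfGetD surf e + ((e :: es).count e : Int) > 2
      · rw [if_pos (by omega)]
        have : ¬ ((e :: es).all (fun x => pvSurfGetD surf x + ((e :: es).count x : Int) ≤ 2) = true) := by
          simp only [List.all_eq_true]
          intro h
          exact absurd (by simpa using h e (by simp)) (not_le.mpr hbig)
        simp only [Bool.not_eq_true] at this
        exact this.symm
      · rw [if_neg (by omega), hfil]
        have hlen : (es.filter (fun x => x != e)).length < n := by
          have := List.length_filter_le (fun x => x != e) es
          simp at hl; omega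
        rw [ih _ hlen _ rfl]
        rw [Bool.eq_iff_iff, List.all_eq_true, List.all_eq_true]
        constructor
        · intro h x hx
          rcases eq_or_ne x e with rfl | hne
          · simpa using not_lt.mp hbig
          · have hxf : x ∈ es.filter (fun x => x != e) := by
              rcases List.mem_cons.mp hx with rfl | hxe
              · exact absurd rfl hne
              · exact List.mem_filter.mpr ⟨hxe, by simp [hne]⟩
            have := h x hxf
            rw [List.count_filter (by simp [hne])] at this
            simpa [List.count_cons, hne, Ne.symm hne] using this
        · intro h x hx
          have hxm : x ∈ e :: es := List.mem_cons_of_mem _ (List.mem_filter.mp hx).1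
          have hne : x ≠ e := by simpa using (List.mem_filter.mp hx).2
          have := h x hxm
          simp [Ne.symm hne] at this
          rw [List.count_filter (by simp [hne])]
          exact decide_eq_true this

-- ===== VERDICT (by name: the statement is the Claim_ definition above) =====
theorem cap_is_manifold_py_spec : Claim_equal_cap_is_manifold_py := by
  intro cap_tris surf _ _
  unfold Spec_cap_is_manifold_py cap_is_manifold_py cap_is_manifold_py_alt
  simp only [pv_innerA]
  have hedges : (cap_tris.flatMap (fun t =>
      [(PySem.List.pyGetD t 0 0, PySem.List.pyGetD t 1 0),
       (PySem.List.pyGetD t 1 0, PySem.List.pyGetD t 2 0),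
       (PySem.List.pyGetD t 2 0, PySem.List.pyGetD t 0 0)].map
        (fun ab => (min ab.1 ab.2, max ab.1 ab.2)))) = cap_tris.flatMap pvEdgeKeys := rfl
  rw [hedges]
  set edges := cap_tris.flatMap pvEdgeKeys with hE
  have hdict : cap_tris.foldl (fun d t =>
      (pvEdgeKeys t).foldl (fun d key => d.insert key (d.getD key 0 + 1)) d) PySem.Dict.empty
      = PySem.Dict.counter edges := by
    rw [hE, ← List.foldl_flatMap]
    exact PySem.Dict.foldl_insert_getD_add_one_eq_counter edges
  rw [hdict, pv_loopA_eq_all, PySem.Dict.items_counter, List.all_map,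
      pv_partLoop_eq_all surf edges.length edges rfl]
  exact pv_all_ext _ _ _ (fun x => PySem.Set.mem_ofList edges x)
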